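-- pv_equiv track=rewrite | github.com/sonic-net/sonic-mgmt | tests/cross_connect/test_ocs_cross_config_001_cli_cross_update.py | pick_ocs_cross
-- ===== SOURCE A (Python) =====
-- def pick_ocs_cross(output):
--     """Extract OCS cross-connect pairs from command output"""
--     pairs = []
--     for line in output.split('\n'):
--         if 'A-' in line and 'B' in line:
--             parts = line.split()
--             if parts:
--                 pair = parts[0]
--                 if 'A-' in pair and 'B' in pair:
--                     pairs.append(pair)
--     return pairs
-- ===== SOURCE B (Python) =====
-- def pick_ocs_cross(output):
--     """Extract OCS cross-connect pairs from command output (single streaming pass)"""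
--     pairs = []
--     token = None   # first token of the current line, None while not started
--     done = False   # first token of the current line is complete
--     for ch in output + '\n':
--         if ch == '\n':
--             if token is not None and 'A-' in token and 'B' in token:
--                 pairs.append(token)
--             token = None
--             done = False
--         elif ch.isspace():
--             if token is not None:
--                 done = True
--         else:
--             if not done:
--                 token = (token if token is not None else '') + ch
--     return pairs
-- ===== Notes on version B (the rewrite author's own statement) =====
-- stated objective: alternative
-- what changed: Replaces the split-into-lines / per-line split-and-scan double pass with a single character-level state machine that streams the output once, accumulating each line's first token and flushing it at newlines.
import Mathlib
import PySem

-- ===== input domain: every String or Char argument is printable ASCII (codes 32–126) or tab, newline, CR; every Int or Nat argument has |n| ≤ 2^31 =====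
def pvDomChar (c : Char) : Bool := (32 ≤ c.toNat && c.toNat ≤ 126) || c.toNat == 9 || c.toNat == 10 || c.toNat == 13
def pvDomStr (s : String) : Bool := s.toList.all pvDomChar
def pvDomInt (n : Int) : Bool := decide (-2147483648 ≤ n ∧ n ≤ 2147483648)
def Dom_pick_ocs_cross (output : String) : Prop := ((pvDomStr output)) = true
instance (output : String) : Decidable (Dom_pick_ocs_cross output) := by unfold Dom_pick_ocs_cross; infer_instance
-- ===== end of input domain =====

-- One honest line: B replaces A's split-lines-then-split-tokens passes with a single
-- character-level state machine streamed once over the output (objective: alternative).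


-- ===== PORT A =====
-- literal transliteration of A: split on '\n'; per line, substring guard, then
-- whitespace-split, take parts[0], substring check, append.
def pick_ocs_cross (output : String) : List String :=
  (PySem.Chars.splitOn output.toList ['\n']).foldl
    (fun pairs line =>
      if PySem.Chars.isIn ['A', '-'] line && PySem.Chars.isIn ['B'] line then
        match PySem.Chars.split₀ line with
        | [] => pairs
        | pair :: _ =>
          if PySem.Chars.isIn ['A', '-'] pair && PySem.Chars.isIn ['B'] pair then
            pairs ++ [String.mk pair]
          else pairs
      else pairs) []

-- ===== PORT B =====
-- B's per-character step: state = (token of current line so far, token-finished flag, pairs)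
def pvBStep (st : Option (List Char) × Bool × List String) (c : Char) :
    Option (List Char) × Bool × List String :=
  match st with
  | (token, done, pairs) =>
    if c = '\n' then
      match token with
      | some t =>
        if PySem.Chars.isIn ['A', '-'] t && PySem.Chars.isIn ['B'] t then
          (none, false, pairs ++ [String.mk t])
        else (none, false, pairs)
      | none => (none, false, pairs)
    else if PySem.Chars.isspace c then
      if token.isSome then (token, true, pairs) else (token, done, pairs)
    else if !done then (some (token.getD [] ++ [c]), done, pairs)
    else (token, done, pairs)

def pick_ocs_cross_alt (output : String) : List String :=
  ((output.toList ++ ['\n']).foldl pvBStep (none, false, [])).2.2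

-- ===== PRECONDITION & SPEC =====
def Spec_pick_ocs_cross (output : String) (out : List String) : Prop := out = pick_ocs_cross_alt output
instance (output : String) (out : List String) : Decidable (Spec_pick_ocs_cross output out) := by unfold Spec_pick_ocs_cross; infer_instance

-- ===== CLAIM (what is proved, stated in full; the proofs are below) =====
def Claim_equal_pick_ocs_cross : Prop := ∀ (output : String), Dom_pick_ocs_cross output → Spec_pick_ocs_cross output (pick_ocs_cross output)

-- ===== LEMMAS AND PROOFS =====

-- flush a finished line's token into the accumulator (B's newline action / A's per-line action)
def pvFlush (acc : List String) (tok : Option (List Char)) : List String :=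
  match tok with
  | some t =>
    if PySem.Chars.isIn ['A', '-'] t && PySem.Chars.isIn ['B'] t then acc ++ [String.mk t]
    else acc
  | none => acc

-- the token B's machine holds at end of a (newline-free) chunk, from a given inner state
def pvRefTok : List Char → Option (List Char) → Bool → Option (List Char)
  | [], tok, _ => tok
  | c :: rest, tok, d =>
    if PySem.Chars.isspace c then pvRefTok rest tok (if tok.isSome then true else d)
    else if !d then pvRefTok rest (some (tok.getD [] ++ [c])) d
    else pvRefTok rest tok d

-- direct-recursion form of B's fold (with the trailing '\n' folded into the [] case)
def pvProcB : List Char → Option (List Char) → Bool → List String → List String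
  | [], tok, _, acc => pvFlush acc tok
  | c :: rest, tok, d, acc =>
    if c = '\n' then pvProcB rest none false (pvFlush acc tok)
    else if PySem.Chars.isspace c then pvProcB rest tok (if tok.isSome then true else d) acc
    else if !d then pvProcB rest (some (tok.getD [] ++ [c])) d acc
    else pvProcB rest tok d acc

-- (first line, remaining lines) of a string, structurally
def pvLines : List Char → List Char × List (List Char)
  | [] => ([], [])
  | c :: r =>
    if c = '\n' then ([], (pvLines r).1 :: (pvLines r).2)
    else (c :: (pvLines r).1, (pvLines r).2)

-- the per-line step both sides reduce to
def pvStep (acc : List String) (line : List Char) : List String :=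
  pvFlush acc (pvRefTok line none false)

lemma pvFoldB (cs : List Char) : ∀ tok d acc,
    ((cs ++ ['\n']).foldl pvBStep (tok, d, acc)).2.2 = pvProcB cs tok d acc := by
  induction cs with
  | nil =>
    intro tok d acc
    simp only [List.nil_append, List.foldl_cons, List.foldl_nil, pvBStep, pvProcB, pvFlush]
    cases tok <;> simp <;> split <;> simp
  | cons c rest ih =>
    intro tok d acc
    rw [show ((c :: rest) ++ ['\n']).foldl pvBStep (tok, d, acc)
          = (rest ++ ['\n']).foldl pvBStep (pvBStep (tok, d, acc) c) from rfl, pvProcB]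
    by_cases hnl : c = '\n'
    · subst hnl
      rw [if_pos rfl]
      have hstep : pvBStep (tok, d, acc) '\n' = (none, false, pvFlush acc tok) := by
        cases tok <;> simp [pvBStep, pvFlush] <;> split <;> rfl
      rw [hstep]; exact ih _ _ _
    · rw [if_neg hnl]
      by_cases hws : PySem.Chars.isspace c = true
      · rw [if_pos hws]
        have hstep : pvBStep (tok, d, acc) c = (tok, (if tok.isSome then true else d), acc) := by
          cases tok <;> simp [pvBStep, hnl, hws]
        rw [hstep]; exact ih _ _ _
      · rw [if_neg hws]
        cases d with
        | false =>
          have hstep : pvBStep (tok, false, acc) c = (some (tok.getD [] ++ [c]), false, acc) := by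
            simp [pvBStep, hnl, hws]
          rw [if_pos (by simp), hstep]; exact ih _ _ _
        | true =>
          have hstep : pvBStep (tok, true, acc) c = (tok, true, acc) := by
            simp [pvBStep, hnl, hws]
          rw [if_neg (by simp), hstep]; exact ih _ _ _

lemma pvRefTok_done (cs : List Char) : ∀ t, pvRefTok cs (some t) true = some t := by
  induction cs with
  | nil => intro t; rfl
  | cons c rest ih =>
    intro t
    simp only [pvRefTok]
    split <;> simp [ih]

lemma pvRefTok_mid (cs : List Char) : ∀ t,
    pvRefTok cs (some t) false = some (t ++ cs.takeWhile (fun c => !PySem.Chars.isspace c)) := by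
  induction cs with
  | nil => intro t; simp [pvRefTok]
  | cons c rest ih =>
    intro t
    simp only [pvRefTok]
    by_cases hws : PySem.Chars.isspace c = true
    · simp [pvRefTok_done, *]
    · simp [hws, ih]

lemma pvRefTok_closed (cs : List Char) :
    pvRefTok cs none false =
      if (cs.dropWhile PySem.Chars.isspace) = [] then none
      else some ((cs.dropWhile PySem.Chars.isspace).takeWhile (fun c => !PySem.Chars.isspace c)) := by
  induction cs with
  | nil => rfl
  | cons c rest ih =>
    by_cases hws : PySem.Chars.isspace c = true
    · simpa [pvRefTok, hws, List.dropWhile_cons] using ih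
    · simp [pvRefTok, hws, pvRefTok_mid]

-- split₀.go: the accumulator factors out
lemma pvGo0_acc (cs : List Char) : ∀ cur acc,
    PySem.Chars.split₀.go cs cur acc = acc.reverse ++ PySem.Chars.split₀.go cs cur [] := by
  induction cs with
  | nil =>
    intro cur acc
    rw [PySem.Chars.split₀.go, PySem.Chars.split₀.go]
    split <;> simp
  | cons c rest ih =>
    intro cur acc
    rw [PySem.Chars.split₀.go]
    conv_rhs => rw [PySem.Chars.split₀.go]
    split
    · split
      · exact ih [] acc
      · rw [ih [] (cur.reverse :: acc), ih [] [cur.reverse]]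
        simp
    · exact ih (c :: cur) acc

lemma pvGo0_head (cs : List Char) : ∀ cur, cur ≠ [] →
    (PySem.Chars.split₀.go cs cur []).head? =
      some (cur.reverse ++ cs.takeWhile (fun c => !PySem.Chars.isspace c)) := by
  induction cs with
  | nil =>
    intro cur hc
    rw [PySem.Chars.split₀.go]
    simp [List.isEmpty_iff, hc]
  | cons c rest ih =>
    intro cur hc
    rw [PySem.Chars.split₀.go]
    by_cases hws : PySem.Chars.isspace c = true
    · rw [if_pos hws, if_neg (by simp [List.isEmpty_iff, hc])]
      rw [pvGo0_acc]
      simp [hws]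
    · rw [if_neg hws, ih (c :: cur) (by simp)]
      simp [List.takeWhile_cons, hws]

lemma pvSplit₀_head (cs : List Char) :
    (PySem.Chars.split₀ cs).head? = pvRefTok cs none false := by
  induction cs with
  | nil => rfl
  | cons c rest ih =>
    show (PySem.Chars.split₀.go (c :: rest) [] []).head? = _
    rw [PySem.Chars.split₀.go]
    by_cases hws : PySem.Chars.isspace c = true
    · rw [if_pos hws, if_pos List.isEmpty_nil]
      simpa [pvRefTok, hws] using ih
    · rw [if_neg hws, pvGo0_head rest [c] (by simp)]
      simp [pvRefTok, hws, pvRefTok_mid]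

lemma pvHead_infix {cs p : List Char}
    (h : (PySem.Chars.split₀ cs).head? = some p) : p <:+: cs := by
  rw [pvSplit₀_head, pvRefTok_closed] at h
  split at h
  · exact absurd h (by simp)
  · have hp : p = (cs.dropWhile PySem.Chars.isspace).takeWhile (fun c => !PySem.Chars.isspace c) := by
      simpa using h.symm
    subst hp
    exact (List.takeWhile_prefix _).isInfix.trans (List.dropWhile_suffix _).isInfix

-- A's per-line body equals pvStep: the line-level substring guard is redundant
lemma pvStepA_eq (pairs : List String) (line : List Char) :
    (if PySem.Chars.isIn ['A', '-'] line && PySem.Chars.isIn ['B'] line then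
        match PySem.Chars.split₀ line with
        | [] => pairs
        | pair :: _ =>
          if PySem.Chars.isIn ['A', '-'] pair && PySem.Chars.isIn ['B'] pair then
            pairs ++ [String.mk pair]
          else pairs
      else pairs) = pvStep pairs line := by
  rw [pvStep, ← pvSplit₀_head]
  cases hsp : PySem.Chars.split₀ line with
  | nil => simp [pvFlush]
  | cons p rest =>
    have hinf : p <:+: line := pvHead_infix (by rw [hsp]; rfl)
    simp only [List.head?_cons, pvFlush]
    by_cases hok : (PySem.Chars.isIn ['A', '-'] p && PySem.Chars.isIn ['B'] p) = true
    · have h1 : PySem.Chars.isIn ['A', '-'] line = true := by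
        rw [PySem.Chars.isIn_iff_infix]
        exact ((PySem.Chars.isIn_iff_infix _ _).1 (by simpa using hok.symm ▸ (Bool.and_elim_left hok))).trans hinf
      have h2 : PySem.Chars.isIn ['B'] line = true := by
        rw [PySem.Chars.isIn_iff_infix]
        exact ((PySem.Chars.isIn_iff_infix _ _).1 (Bool.and_elim_right hok)).trans hinf
      simp [h1, h2, hok]
    · simp only [Bool.not_eq_true] at hok
      simp only [hok, Bool.false_eq_true, if_false]
      split
      · rfl
      · rfl

-- splitOn with separator '\n' computes pvLines
lemma pvSplitOn_go (fuel : Nat) : ∀ (cs cur : List Char) (acc : List (List Char)),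
    cs.length ≤ fuel →
    PySem.Chars.splitOn.go ['\n'] fuel cs cur acc =
      acc.reverse ++ (cur.reverse ++ (pvLines cs).1) :: (pvLines cs).2 := by
  induction fuel with
  | zero =>
    intro cs cur acc h
    have : cs = [] := List.length_eq_zero_iff.1 (Nat.le_zero.1 h)
    subst this
    rw [PySem.Chars.splitOn.go]
    simp [pvLines]
  | succ fuel ih =>
    intro cs cur acc h
    cases cs with
    | nil =>
      rw [PySem.Chars.splitOn.go]
      · simp [pvLines]
      · omega
    | cons c rest =>
      rw [PySem.Chars.splitOn.go]
      by_cases hnl : c = '\n'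
      · subst hnl
        rw [if_pos (by simp [List.isPrefixOf]), show List.drop ['\n'].length ('\n' :: rest) = rest from rfl]
        rw [ih rest [] (cur.reverse :: acc) (by simpa using Nat.lt_succ_iff.1 (by simpa using h))]
        simp [pvLines]
      · rw [if_neg (by simp [List.isPrefixOf, Ne.symm hnl])]
        rw [ih rest (c :: cur) acc (by simpa using Nat.lt_succ_iff.1 (by simpa using h))]
        simp [pvLines, hnl]

lemma pvSplitOn_nl (cs : List Char) :
    PySem.Chars.splitOn cs ['\n'] = (pvLines cs).1 :: (pvLines cs).2 := by
  rw [PySem.Chars.splitOn]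
  rw [pvSplitOn_go (cs.length + 1) cs [] [] (Nat.le_succ _)]
  simp

-- main invariant: B's machine computes A's per-line fold
lemma pvProcB_eq (cs : List Char) : ∀ tok d acc,
    pvProcB cs tok d acc =
      (pvLines cs).2.foldl pvStep (pvFlush acc (pvRefTok (pvLines cs).1 tok d)) := by
  induction cs with
  | nil => intro tok d acc; rfl
  | cons c rest ih =>
    intro tok d acc
    rw [pvProcB]
    by_cases hnl : c = '\n'
    · subst hnl
      rw [if_pos rfl, ih none false (pvFlush acc tok)]
      simp [pvLines, pvRefTok, pvStep]
    · rw [if_neg hnl]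
      by_cases hws : PySem.Chars.isspace c = true
      · rw [if_pos hws, ih tok _ acc]
        simp [pvLines, hnl, pvRefTok, hws]
      · rw [if_neg hws]
        cases d with
        | false =>
          rw [if_pos (by simp), ih _ false acc]
          simp [pvLines, hnl, pvRefTok, hws]
        | true =>
          rw [if_neg (by simp), ih tok true acc]
          simp [pvLines, hnl, pvRefTok, hws]

-- ===== VERDICT (by name: the statement is the Claim_ definition above) =====
theorem pick_ocs_cross_spec : Claim_equal_pick_ocs_cross := by
  intro output _
  show pick_ocs_cross output = pick_ocs_cross_alt output
  rw [pick_ocs_cross, pick_ocs_cross_alt, pvFoldB, pvProcB_eq, pvSplitOn_nl]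
  simp only [List.foldl_cons]
  congr 1
  · funext pairs line
    exact pvStepA_eq pairs line
  · exact pvStepA_eq [] (pvLines output.toList).1
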